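-- pv_equiv track=rewrite | github.com/harshwaladvisory/Bank_Transaction_Posting_Tool | processors/module_router.py | _determine_receipt_type
-- ===== SOURCE A (Python) =====
-- from typing import Dict, List, Tuple
--
-- def _determine_receipt_type(transaction: Dict) -> str:
--     """Determine the type of cash receipt"""
--     description = transaction.get('description', '').lower()
--     category = transaction.get('category', '').lower() if transaction.get('category') else ''
--
--     if any(kw in description for kw in ['grant', 'hud', 'doe', 'hhs', 'federal']):
--         return 'Grant Receipt'
--     elif any(kw in description for kw in ['rent', 'lease', 'tenant']):
--         return 'Rental Income'
--     elif any(kw in description for kw in ['interest', 'dividend']):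
--         return 'Investment Income'
--     elif any(kw in description for kw in ['donation', 'contribution', 'gift']):
--         return 'Donation'
--     elif any(kw in description for kw in ['refund', 'reimbursement', 'rebate']):
--         return 'Refund/Reimbursement'
--     else:
--         return 'Customer Receipt'
-- ===== SOURCE B (Python) =====
-- # B: single left-to-right scan of the description; at each position test which
-- # keywords start there and keep the smallest (highest-priority) rule index.
-- KEYWORDS = [('grant', 0), ('hud', 0), ('doe', 0), ('hhs', 0), ('federal', 0),
--             ('rent', 1), ('lease', 1), ('tenant', 1),
--             ('interest', 2), ('dividend', 2),
--             ('donation', 3), ('contribution', 3), ('gift', 3),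
--             ('refund', 4), ('reimbursement', 4), ('rebate', 4)]
-- LABELS = ['Grant Receipt', 'Rental Income', 'Investment Income', 'Donation',
--           'Refund/Reimbursement']
--
-- def _determine_receipt_type(transaction) -> str:
--     """Determine the type of cash receipt"""
--     description = transaction.get('description', '').lower()
--     best = 5
--     for i, _ch in enumerate(description):
--         for kw, r in KEYWORDS:
--             if r < best and description.startswith(kw, i):
--                 best = r
--     return LABELS[best] if best < 5 else 'Customer Receipt'
-- ===== Notes on version B (the rewrite author's own statement) =====
-- stated objective: alternative
-- what changed: Instead of five ordered any-substring-in-description checks, B makes a single left-to-right scan over the description, testing at each position which keywords start there and keeping the minimum rule index, then maps that index to its label.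
import Mathlib
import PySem

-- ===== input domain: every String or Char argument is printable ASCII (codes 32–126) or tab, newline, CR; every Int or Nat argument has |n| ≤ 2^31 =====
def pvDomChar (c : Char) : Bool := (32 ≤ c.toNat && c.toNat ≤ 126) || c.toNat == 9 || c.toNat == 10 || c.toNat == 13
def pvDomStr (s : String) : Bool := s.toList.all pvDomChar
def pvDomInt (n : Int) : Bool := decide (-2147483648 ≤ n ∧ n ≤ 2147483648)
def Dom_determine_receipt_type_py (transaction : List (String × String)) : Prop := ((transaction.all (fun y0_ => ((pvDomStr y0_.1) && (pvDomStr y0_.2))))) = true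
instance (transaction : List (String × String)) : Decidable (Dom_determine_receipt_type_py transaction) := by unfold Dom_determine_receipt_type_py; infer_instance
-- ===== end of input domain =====

-- B replaces A's cascade of substring searches by a single left-to-right scan of the
-- description that tests which keywords start at each position and keeps the smallest
-- rule index (alternative algorithm; same result, no speed claim).

-- ===== PORT A =====
def determine_receipt_type_py (transaction : List (String × String)) : String :=
  let description := PySem.Str.lower (PySem.Dict.getD (PySem.Dict.mk transaction) "description" "")
  let catRaw := PySem.Dict.getD (PySem.Dict.mk transaction) "category" ""
  let _category := if catRaw ≠ "" then PySem.Str.lower catRaw else ""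
  if ["grant", "hud", "doe", "hhs", "federal"].any (fun kw => PySem.Str.isIn kw description) then
    "Grant Receipt"
  else if ["rent", "lease", "tenant"].any (fun kw => PySem.Str.isIn kw description) then
    "Rental Income"
  else if ["interest", "dividend"].any (fun kw => PySem.Str.isIn kw description) then
    "Investment Income"
  else if ["donation", "contribution", "gift"].any (fun kw => PySem.Str.isIn kw description) then
    "Donation"
  else if ["refund", "reimbursement", "rebate"].any (fun kw => PySem.Str.isIn kw description) then
    "Refund/Reimbursement"
  else
    "Customer Receipt"

-- ===== PORT B =====
def pvKW : List (String × Nat) :=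
  [("grant", 0), ("hud", 0), ("doe", 0), ("hhs", 0), ("federal", 0),
   ("rent", 1), ("lease", 1), ("tenant", 1),
   ("interest", 2), ("dividend", 2),
   ("donation", 3), ("contribution", 3), ("gift", 3),
   ("refund", 4), ("reimbursement", 4), ("rebate", 4)]

def pvLabels : List String :=
  ["Grant Receipt", "Rental Income", "Investment Income", "Donation", "Refund/Reimbursement"]

-- Python's description.startswith(kw, i) with 0 ≤ i is exactly
-- PySem.Chars.startswith (description.toList.drop i) kw.toList (enumerate indices are ≥ 0,
-- so .toNat is exact).
def determine_receipt_type_py_alt (transaction : List (String × String)) : String :=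
  let description := PySem.Str.lower (PySem.Dict.getD (PySem.Dict.mk transaction) "description" "")
  let d := description.toList
  let best := (PySem.List.enumerate d 0).foldl (fun best e =>
      pvKW.foldl (fun best p =>
        if p.2 < best ∧ PySem.Chars.startswith (d.drop e.1.toNat) p.1.toList then p.2 else best)
        best) 5
  if best < 5 then pvLabels.getD best "" else "Customer Receipt"

-- ===== PRECONDITION & SPEC =====
def Spec_determine_receipt_type_py (transaction : List (String × String)) (out : String) : Prop := out = determine_receipt_type_py_alt transaction
instance (transaction : List (String × String)) (out : String) : Decidable (Spec_determine_receipt_type_py transaction out) := by unfold Spec_determine_receipt_type_py; infer_instance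

-- ===== CLAIM (what is proved, stated in full; the proofs are below) =====
def Claim_equal_determine_receipt_type_py : Prop := ∀ (transaction : List (String × String)), Dom_determine_receipt_type_py transaction → Spec_determine_receipt_type_py transaction (determine_receipt_type_py transaction)

-- ===== LEMMAS AND PROOFS =====

-- generic facts about the decreasing fold shape of B
theorem pv_foldl_le {β : Type} (H : Nat → β → Nat) (dec : ∀ b e, H b e ≤ b) :
    ∀ (E : List β) (b : Nat), E.foldl H b ≤ b := by
  intro E
  induction E with
  | nil => intro b; simp
  | cons e E ih => intro b; exact le_trans (ih (H b e)) (dec b e)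

theorem pv_foldl_le_of_mem {β : Type} (H : Nat → β → Nat) (dec : ∀ b e, H b e ≤ b)
    {E : List β} {e : β} (he : e ∈ E) {v : Nat} (hv : ∀ b, H b e ≤ v) :
    ∀ b, E.foldl H b ≤ v := by
  induction E with
  | nil => cases he
  | cons q E ih =>
    intro b
    rcases List.mem_cons.mp he with h | h
    · subst h; exact le_trans (pv_foldl_le H dec E (H b e)) (hv b)
    · rw [List.foldl_cons]; exact ih h (H b q)
  
theorem pv_foldl_attain {β : Type} (H : Nat → β → Nat) (Q : Nat → Prop) :
    ∀ (E : List β) (b : Nat), (∀ b e, e ∈ E → H b e = b ∨ Q (H b e)) →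
      (E.foldl H b = b ∨ Q (E.foldl H b)) := by
  intro E
  induction E with
  | nil => intro b _; left; rfl
  | cons q E ih =>
    intro b hstep
    rcases ih (H b q) (fun b' e he => hstep b' e (List.mem_cons_of_mem q he)) with h | h
    · rw [List.foldl_cons, h]
      exact hstep b q (List.mem_cons_self)
    · right; exact h

-- a nonempty keyword occurs somewhere iff it is an infix
theorem pv_occ_iff (kw : List Char) (hk : kw ≠ []) (d : List Char) :
    (∃ i, i < d.length ∧ PySem.Chars.startswith (d.drop i) kw = true) ↔ kw <:+: d := by
  constructor
  · rintro ⟨i, _, hs⟩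
    exact ((PySem.Chars.startswith_iff _ _).mp hs).isInfix.trans (d.drop_suffix i).isInfix
  · rintro ⟨s, t, rfl⟩
    refine ⟨s.length, ?_, ?_⟩
    · have := List.length_append (as := s) (bs := kw ++ t)
      have hk' : 0 < kw.length := List.length_pos_iff.mpr hk
      simp only [List.length_append] at *
      omega
    · rw [List.append_assoc, List.drop_left]
      exact (PySem.Chars.startswith_iff _ _).mpr ⟨t, rfl⟩

-- group r matches: some keyword of rule r occurs in d
def pvG (d : List Char) (r : Nat) : Prop := ∃ p ∈ pvKW, p.2 = r ∧ p.1.toList <:+: d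

theorem pvG0_iff (s : String) :
    (["grant", "hud", "doe", "hhs", "federal"].any (fun kw => PySem.Str.isIn kw s) = true) ↔ pvG s.toList 0 := by
  simp [pvG, pvKW, PySem.Chars.isIn_iff_infix]

theorem pvG1_iff (s : String) :
    (["rent", "lease", "tenant"].any (fun kw => PySem.Str.isIn kw s) = true) ↔ pvG s.toList 1 := by
  simp [pvG, pvKW, PySem.Chars.isIn_iff_infix]

theorem pvG2_iff (s : String) :
    (["interest", "dividend"].any (fun kw => PySem.Str.isIn kw s) = true) ↔ pvG s.toList 2 := by
  simp [pvG, pvKW, PySem.Chars.isIn_iff_infix]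

theorem pvG3_iff (s : String) :
    (["donation", "contribution", "gift"].any (fun kw => PySem.Str.isIn kw s) = true) ↔ pvG s.toList 3 := by
  simp [pvG, pvKW, PySem.Chars.isIn_iff_infix]

theorem pvG4_iff (s : String) :
    (["refund", "reimbursement", "rebate"].any (fun kw => PySem.Str.isIn kw s) = true) ↔ pvG s.toList 4 := by
  simp [pvG, pvKW, PySem.Chars.isIn_iff_infix]

-- B's scan value
def pvVal (d : List Char) : Nat :=
  (PySem.List.enumerate d 0).foldl (fun best e =>
      pvKW.foldl (fun best p =>
        if p.2 < best ∧ PySem.Chars.startswith (d.drop e.1.toNat) p.1.toList then p.2 else best)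
        best) 5

theorem pv_step_le (c : Prop) [Decidable c] (r b : Nat) : (if r < b ∧ c then r else b) ≤ b := by
  split <;> omega

theorem pvVal_le_of_G (d : List Char) (r : Nat) (h : pvG d r) : pvVal d ≤ r := by
  obtain ⟨p, hp, hpr, hinf⟩ := h
  have hk : p.1.toList ≠ [] := by revert hp; unfold pvKW; intro hp; fin_cases hp <;> decide
  obtain ⟨i, hi, hs⟩ := (pv_occ_iff p.1.toList hk d).mpr hinf
  have he : ((i : Int), d[i]) ∈ PySem.List.enumerate d 0 := by
    rw [PySem.List.mem_enumerate_iff]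
    exact ⟨i, hi, by simp⟩
  unfold pvVal
  refine pv_foldl_le_of_mem _ ?_ he ?_ 5
  · intro b e
    exact pv_foldl_le _ (fun b' p' => pv_step_le _ _ _) pvKW b
  · intro b
    refine pv_foldl_le_of_mem _ (fun b' p' => pv_step_le _ _ _) hp ?_ b
    intro b'
    dsimp only
    rw [hpr]
    have ht : ((i : Int)).toNat = i := by simp
    rw [ht, hs]
    split <;> rename_i hc
    · omega
    · have : ¬ r < b' := fun hlt => hc ⟨hlt, rfl⟩
      omega

theorem pvVal_attain (d : List Char) : pvVal d = 5 ∨ (pvVal d ≤ 4 ∧ pvG d (pvVal d)) := by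
  have h := pv_foldl_attain
      (fun (b : Nat) (e : Int × Char) =>
        pvKW.foldl (fun b p =>
          if p.2 < b ∧ PySem.Chars.startswith (d.drop e.1.toNat) p.1.toList then p.2 else b) b)
      (fun v => ∃ p ∈ pvKW, v = p.2 ∧ p.1.toList <:+: d)
      (PySem.List.enumerate d 0) 5 ?_
  · rcases h with h | h
    · left; exact h
    · right
      obtain ⟨p, hp, hv, hinf⟩ := h
      have hr : p.2 ≤ 4 := by revert hp; unfold pvKW; intro hp; fin_cases hp <;> decide
      refine ⟨by unfold pvVal; omega, ?_⟩
      have hval : pvVal d = p.2 := hv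
      rw [hval]
      exact ⟨p, hp, rfl, hinf⟩
  · intro b e he
    rw [PySem.List.mem_enumerate_iff] at he
    obtain ⟨k, hk, hek⟩ := he
    refine pv_foldl_attain
        (fun (b : Nat) (p : String × Nat) =>
          if p.2 < b ∧ PySem.Chars.startswith (d.drop e.1.toNat) p.1.toList then p.2 else b)
        (fun v => ∃ p ∈ pvKW, v = p.2 ∧ p.1.toList <:+: d) pvKW b ?_
    intro b' p hp
    dsimp only
    split <;> rename_i hc
    · right
      refine ⟨p, hp, rfl, ?_⟩
      have hknz : p.1.toList ≠ [] := by
        revert hp; unfold pvKW; intro hp; fin_cases hp <;> decide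
      refine (pv_occ_iff p.1.toList hknz d).mp ⟨e.1.toNat, ?_, hc.2⟩
      subst hek; simpa using hk
    · left; rfl

theorem pv_core (s : String) :
    (if ["grant", "hud", "doe", "hhs", "federal"].any (fun kw => PySem.Str.isIn kw s) then
      "Grant Receipt"
    else if ["rent", "lease", "tenant"].any (fun kw => PySem.Str.isIn kw s) then
      "Rental Income"
    else if ["interest", "dividend"].any (fun kw => PySem.Str.isIn kw s) then
      "Investment Income"
    else if ["donation", "contribution", "gift"].any (fun kw => PySem.Str.isIn kw s) then
      "Donation"
    else if ["refund", "reimbursement", "rebate"].any (fun kw => PySem.Str.isIn kw s) then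
      "Refund/Reimbursement"
    else
      "Customer Receipt")
    = (if pvVal s.toList < 5 then pvLabels.getD (pvVal s.toList) "" else "Customer Receipt") := by
  have hle := pvVal_le_of_G s.toList
  have hat := pvVal_attain s.toList
  by_cases g0 : pvG s.toList 0
  · have hv : pvVal s.toList = 0 := Nat.le_zero.mp (hle 0 g0)
    rw [if_pos ((pvG0_iff s).mpr g0), hv]; rfl
  · rw [if_neg (fun h => g0 ((pvG0_iff s).mp h))]
    by_cases g1 : pvG s.toList 1
    · have hv : pvVal s.toList = 1 := by
        have h1 := hle 1 g1
        rcases hat with h | ⟨_, hG⟩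
        · omega
        · have : pvVal s.toList = 0 ∨ pvVal s.toList = 1 := by omega
          rcases this with h | h
          · exact absurd (h ▸ hG) g0
          · exact h
      rw [if_pos ((pvG1_iff s).mpr g1), hv]; rfl
    · rw [if_neg (fun h => g1 ((pvG1_iff s).mp h))]
      by_cases g2 : pvG s.toList 2
      · have hv : pvVal s.toList = 2 := by
          have h2 := hle 2 g2
          rcases hat with h | ⟨_, hG⟩
          · omega
          · have : pvVal s.toList = 0 ∨ pvVal s.toList = 1 ∨ pvVal s.toList = 2 := by omega
            rcases this with h | h | h
            · exact absurd (h ▸ hG) g0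
            · exact absurd (h ▸ hG) g1
            · exact h
        rw [if_pos ((pvG2_iff s).mpr g2), hv]; rfl
      · rw [if_neg (fun h => g2 ((pvG2_iff s).mp h))]
        by_cases g3 : pvG s.toList 3
        · have hv : pvVal s.toList = 3 := by
            have h3 := hle 3 g3
            rcases hat with h | ⟨_, hG⟩
            · omega
            · have : pvVal s.toList = 0 ∨ pvVal s.toList = 1 ∨ pvVal s.toList = 2 ∨
                  pvVal s.toList = 3 := by omega
              rcases this with h | h | h | h
              · exact absurd (h ▸ hG) g0
              · exact absurd (h ▸ hG) g1
              · exact absurd (h ▸ hG) g2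
              · exact h
          rw [if_pos ((pvG3_iff s).mpr g3), hv]; rfl
        · rw [if_neg (fun h => g3 ((pvG3_iff s).mp h))]
          by_cases g4 : pvG s.toList 4
          · have hv : pvVal s.toList = 4 := by
              have h4 := hle 4 g4
              rcases hat with h | ⟨_, hG⟩
              · omega
              · have : pvVal s.toList = 0 ∨ pvVal s.toList = 1 ∨ pvVal s.toList = 2 ∨
                    pvVal s.toList = 3 ∨ pvVal s.toList = 4 := by omega
                rcases this with h | h | h | h | h
                · exact absurd (h ▸ hG) g0
                · exact absurd (h ▸ hG) g1
                · exact absurd (h ▸ hG) g2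
                · exact absurd (h ▸ hG) g3
                · exact h
            rw [if_pos ((pvG4_iff s).mpr g4), hv]; rfl
          · rw [if_neg (fun h => g4 ((pvG4_iff s).mp h))]
            have hv : pvVal s.toList = 5 := by
              rcases hat with h | ⟨h4, hG⟩
              · exact h
              · exfalso
                have : pvVal s.toList = 0 ∨ pvVal s.toList = 1 ∨ pvVal s.toList = 2 ∨
                    pvVal s.toList = 3 ∨ pvVal s.toList = 4 := by omega
                rcases this with h | h | h | h | h
                · exact g0 (h ▸ hG)
                · exact g1 (h ▸ hG)
                · exact g2 (h ▸ hG)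
                · exact g3 (h ▸ hG)
                · exact g4 (h ▸ hG)
            rw [hv]; rfl

-- ===== VERDICT (by name: the statement is the Claim_ definition above) =====
theorem determine_receipt_type_py_spec : Claim_equal_determine_receipt_type_py := by
  intro t _
  unfold Spec_determine_receipt_type_py determine_receipt_type_py determine_receipt_type_py_alt
  exact pv_core _
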